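-- pv_equiv track=rewrite | github.com/paulklemstine/factor | round11_sat_complete.py | base_hop_prefilter
-- ===== SOURCE A (Python) =====
-- def base_hop_prefilter(n, bases=None):
--     """For each base b, compute valid (x mod b, y mod b) pairs.
--     Factors are odd and > 1, so exclude 0 for odd bases where factor can't be 0 mod b
--     (unless n mod b == 0)."""
--     if bases is None:
--         bases = [3, 5, 7, 8, 9, 11, 13, 16]
--     base_pairs = {}
--     for b in bases:
--         nb = n % b
--         pairs = set()
--         for xr in range(b):
--             for yr in range(b):
--                 if (xr * yr) % b == nb:
--                     pairs.add((xr, yr))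
--         base_pairs[b] = pairs
--     return base_pairs
-- ===== SOURCE B (Python) =====
-- def _egcd(a, b):
--     if b == 0:
--         return (a, 1, 0)
--     g, x, y = _egcd(b, a % b)
--     return (g, y, x - (a // b) * y)
--
--
-- def base_hop_prefilter(n, bases=None):
--     """Same table as A, but per residue xr the congruence xr*yr = n (mod b) is
--     solved directly with the extended Euclidean algorithm instead of scanning
--     every yr: gcd test for solvability, then the g solutions y0 + k*(b//g)."""
--     if bases is None:
--         bases = [3, 5, 7, 8, 9, 11, 13, 16]
--     base_pairs = {}
--     for b in bases:
--         nb = n % b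
--         pairs = set()
--         for xr in range(b):
--             g, inv, _ = _egcd(xr, b)
--             if nb % g == 0:
--                 m = b // g
--                 y0 = (inv * (nb // g)) % m
--                 for k in range(g):
--                     pairs.add((xr, y0 + k * m))
--         base_pairs[b] = pairs
--     return base_pairs
-- ===== Notes on version B (the rewrite author's own statement) =====
-- stated objective: faster
-- what changed: Instead of scanning all b^2 pairs per base, B solves the linear congruence xr*yr = n (mod b) for each xr with the extended Euclidean algorithm (gcd solvability test, then enumerate the g solutions y0 + k*(b//g)), producing the same pair sets.
import Mathlib
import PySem

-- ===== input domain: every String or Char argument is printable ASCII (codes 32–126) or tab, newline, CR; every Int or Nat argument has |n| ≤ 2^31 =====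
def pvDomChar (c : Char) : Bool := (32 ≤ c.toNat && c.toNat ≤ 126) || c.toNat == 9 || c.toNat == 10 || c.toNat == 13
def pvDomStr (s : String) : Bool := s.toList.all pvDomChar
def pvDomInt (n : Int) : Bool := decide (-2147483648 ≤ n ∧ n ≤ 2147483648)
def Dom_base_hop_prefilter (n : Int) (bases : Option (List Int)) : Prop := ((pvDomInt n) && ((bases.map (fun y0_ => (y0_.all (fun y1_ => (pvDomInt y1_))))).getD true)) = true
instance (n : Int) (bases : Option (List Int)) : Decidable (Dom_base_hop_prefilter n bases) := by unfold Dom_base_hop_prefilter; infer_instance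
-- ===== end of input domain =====

-- B changes the per-base inner scan into a direct solution of the linear congruence
-- xr*yr ≡ n (mod b) via the extended Euclidean algorithm (objective: faster, asymptotic).

-- ===== PORT A =====
def base_hop_prefilter (n : Int) (bases : Option (List Int)) : List (Int × List (Int × Int)) :=
  let bs := match bases with
    | none => [3, 5, 7, 8, 9, 11, 13, 16]
    | some l => l
  (bs.foldl (fun (d : PySem.Dict Int (PySem.Set (Int × Int))) b =>
      let nb := PySem.Int.mod n b
      let pairs : PySem.Set (Int × Int) :=
        (PySem.List.pyRange 0 b 1).foldl (fun ps xr =>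
          (PySem.List.pyRange 0 b 1).foldl (fun ps yr =>
            if PySem.Int.mod (xr * yr) b == nb then PySem.Set.add ps (xr, yr) else ps) ps)
          PySem.Set.empty
      d.insert b pairs) PySem.Dict.empty).items

-- ===== PORT B =====
-- helper: Python's recursive _egcd(a, b); terminates because |a % b| < |b| when b ≠ 0
def pvEgcd (a b : Int) : Int × Int × Int :=
  if hb : b = 0 then (a, 1, 0)
  else
    let r := pvEgcd b (PySem.Int.mod a b)
    (r.1, r.2.2, r.2.1 - PySem.Int.floordiv a b * r.2.2)
termination_by b.natAbs
decreasing_by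
  rcases lt_trichotomy b 0 with h | h | h
  · have h1 := PySem.Int.mod_neg_bounds a h
    omega
  · exact absurd h hb
  · have h1 := PySem.Int.mod_nonneg a h
    have h2 := PySem.Int.mod_lt a h
    omega

def base_hop_prefilter_alt (n : Int) (bases : Option (List Int)) : List (Int × List (Int × Int)) :=
  let bs := match bases with
    | none => [3, 5, 7, 8, 9, 11, 13, 16]
    | some l => l
  (bs.foldl (fun (d : PySem.Dict Int (PySem.Set (Int × Int))) b =>
      let nb := PySem.Int.mod n b
      let pairs : PySem.Set (Int × Int) :=
        (PySem.List.pyRange 0 b 1).foldl (fun ps xr =>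
          let e := pvEgcd xr b
          if PySem.Int.mod nb e.1 == 0 then
            let m := PySem.Int.floordiv b e.1
            let y0 := PySem.Int.mod (e.2.1 * PySem.Int.floordiv nb e.1) m
            (PySem.List.pyRange 0 e.1 1).foldl (fun ps k => PySem.Set.add ps (xr, y0 + k * m)) ps
          else ps) PySem.Set.empty
      d.insert b pairs) PySem.Dict.empty).items

-- ===== PRECONDITION & SPEC =====
-- Pre_ excludes a base equal to 0, on which both Pythons raise ZeroDivisionError at 'n % b'.
def Pre_base_hop_prefilter (n : Int) (bases : Option (List Int)) : Prop :=
  (0 : Int) ∉ bases.getD []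
instance (n : Int) (bases : Option (List Int)) : Decidable (Pre_base_hop_prefilter n bases) := by
  unfold Pre_base_hop_prefilter; infer_instance
def pvWitness_base_hop_prefilter : Int × Option (List Int) := (10, none)

def Spec_base_hop_prefilter (n : Int) (bases : Option (List Int)) (out : List (Int × List (Int × Int))) : Prop := out = base_hop_prefilter_alt n bases
instance (n : Int) (bases : Option (List Int)) (out : List (Int × List (Int × Int))) : Decidable (Spec_base_hop_prefilter n bases out) := by unfold Spec_base_hop_prefilter; infer_instance

-- ===== CLAIM (what is proved, stated in full; the proofs are below) =====
def Claim_equal_base_hop_prefilter : Prop := ∀ (n : Int) (bases : Option (List Int)), Dom_base_hop_prefilter n bases → Pre_base_hop_prefilter n bases → Spec_base_hop_prefilter n bases (base_hop_prefilter n bases)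

-- ===== LEMMAS AND PROOFS =====

theorem pvEgcd_spec_aux : ∀ (k : Nat) (a b : Int), b.natAbs ≤ k → 0 ≤ a → 0 ≤ b →
    (pvEgcd a b).1 = (Int.gcd a b : Int) ∧
    a * (pvEgcd a b).2.1 + b * (pvEgcd a b).2.2 = (pvEgcd a b).1 := by
  intro k
  induction k with
  | zero =>
    intro a b hk ha hb
    have hb0 : b = 0 := by omega
    subst hb0
    rw [pvEgcd]
    simp [Int.gcd]
    exact (abs_of_nonneg ha).symm
  | succ k ih =>
    intro a b hk ha hb
    by_cases hb0 : b = 0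
    · subst hb0
      rw [pvEgcd]
      simp [Int.gcd]
      exact (abs_of_nonneg ha).symm
    · have hbpos : 0 < b := lt_of_le_of_ne hb (Ne.symm hb0)
      rw [pvEgcd]
      simp only [hb0, dite_false]
      have hmnn := PySem.Int.mod_nonneg a hbpos
      have hmlt := PySem.Int.mod_lt a hbpos
      obtain ⟨h1, h2⟩ := ih b (PySem.Int.mod a b) (by omega) hb hmnn
      constructor
      · rw [h1, PySem.Int.mod_eq_emod_of_pos hbpos,
          show Int.gcd b (a % b) = Int.gcd (a % b) b from Int.gcd_comm b (a % b),
          Int.gcd_emod a b]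
      · have hfm := PySem.Int.floordiv_mul_add_mod a b
        linear_combination h2 - (pvEgcd b (PySem.Int.mod a b)).2.2 * hfm

theorem pvEgcd_spec (a b : Int) (ha : 0 ≤ a) (hb : 0 ≤ b) :
    (pvEgcd a b).1 = (Int.gcd a b : Int) ∧
    a * (pvEgcd a b).2.1 + b * (pvEgcd a b).2.2 = (pvEgcd a b).1 :=
  pvEgcd_spec_aux b.natAbs a b le_rfl ha hb
theorem pvFoldlAddFresh {α : Type} [BEq α] [LawfulBEq α] :
    ∀ (l : List α) (s : PySem.Set α), (∀ x ∈ l, x ∉ s) → l.Nodup →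
      l.foldl PySem.Set.add s = s ++ l := by
  intro l
  induction l with
  | nil => intro s _ _; simp
  | cons x t ih =>
    intro s hs hnd
    simp only [List.foldl_cons]
    rw [PySem.Set.add_of_not_mem (hs x (by simp))]
    rw [ih (s ++ [x]) ?_ (List.Nodup.of_cons hnd)]
    · simp
    · intro y hy
      simp only [List.mem_append, List.mem_singleton]
      rintro (h | rfl)
      · exact hs y (by simp [hy]) h
      · exact (List.nodup_cons.mp hnd).1 hy

theorem pvFoldlBuild (f : Int → List Int) :
    ∀ (l : List Int) (s : PySem.Set (Int × Int)),
      (∀ p ∈ s, p.1 ∉ l) → l.Nodup → (∀ x ∈ l, (f x).Nodup) →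
      l.foldl (fun ps x => ((f x).map (fun y => (x, y))).foldl PySem.Set.add ps) s
        = s ++ l.flatMap (fun x => (f x).map (fun y => (x, y))) := by
  intro l
  induction l with
  | nil => intro s _ _ _; simp
  | cons x t ih =>
    intro s hs hnd hf
    simp only [List.foldl_cons]
    rw [pvFoldlAddFresh ((f x).map (fun y => (x, y))) s ?fresh ?nd]
    case fresh =>
      rintro ⟨x', y⟩ hm hmem
      have hx : x' = x := by
        rcases List.mem_map.mp hm with ⟨y', _, he⟩
        have := congrArg Prod.fst he
        simpa using this.symm
      exact hs (x', y) hmem (by simp [hx])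
    case nd =>
      exact List.Nodup.map (fun a b h => by simpa using h) (hf x (by simp))
    rw [ih (s ++ (f x).map (fun y => (x, y))) ?_ (List.Nodup.of_cons hnd) ?_]
    · simp
    · intro p hp
      rcases List.mem_append.mp hp with h | h
      · exact fun hm => hs p h (by simp [hm])
      · rcases List.mem_map.mp h with ⟨y', _, he⟩
        have : p.1 = x := by rw [← he]
        rw [this]
        exact (List.nodup_cons.mp hnd).1
    · intro z hz; exact hf z (by simp [hz])
theorem pvSol_eq (b nb xr : Int) (hb : 0 < b) (hxr : 0 ≤ xr) (hnb0 : 0 ≤ nb) (hnbb : nb < b) :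
    (PySem.List.pyRange 0 b 1).filter (fun yr => PySem.Int.mod (xr * yr) b == nb)
      = (if PySem.Int.mod nb (pvEgcd xr b).1 == 0 then
          (PySem.List.pyRange 0 (pvEgcd xr b).1 1).map
            (fun k => PySem.Int.mod ((pvEgcd xr b).2.1 * PySem.Int.floordiv nb (pvEgcd xr b).1)
                        (PySem.Int.floordiv b (pvEgcd xr b).1)
                      + k * PySem.Int.floordiv b (pvEgcd xr b).1)
          else []) := by
  obtain ⟨hg1, hbez⟩ := pvEgcd_spec xr b hxr (le_of_lt hb)
  set g := (pvEgcd xr b).1 with hgdef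
  set inv := (pvEgcd xr b).2.1 with hinvdef
  set w := (pvEgcd xr b).2.2 with hwdef
  have hgpos : 0 < g := by
    rw [hg1]
    have : 0 < Int.gcd xr b := Int.gcd_pos_of_ne_zero_right xr (ne_of_gt hb)
    exact_mod_cast this
  have hgb : g ∣ b := hg1 ▸ Int.gcd_dvd_right xr b
  have hgx : g ∣ xr := hg1 ▸ Int.gcd_dvd_left xr b
  by_cases hdvd : g ∣ nb
  · -- solvable case
    rw [if_pos (by rw [beq_iff_eq]; exact (PySem.Int.mod_eq_zero_iff_dvd nb g).mpr hdvd)]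
    have hmdef : PySem.Int.floordiv b g = b / g := PySem.Int.floordiv_eq_ediv_of_pos hgpos
    have hqdef : PySem.Int.floordiv nb g = nb / g := PySem.Int.floordiv_eq_ediv_of_pos hgpos
    rw [hmdef, hqdef]
    set m := b / g with hm'
    set q := nb / g with hq'
    have hm : m * g = b := Int.ediv_mul_cancel hgb
    have hq : g * q = nb := Int.mul_ediv_cancel' hdvd
    have hmpos : 0 < m := by nlinarith
    have hy0def : PySem.Int.mod (inv * q) m = (inv * q) % m := PySem.Int.mod_eq_emod_of_pos hmpos
    rw [hy0def]
    set y0 := (inv * q) % m with hy0'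
    have hy00 : 0 ≤ y0 := Int.emod_nonneg _ (ne_of_gt hmpos)
    have hy0m : y0 < m := Int.emod_lt_of_pos _ hmpos
    set x' := xr / g with hx''
    have hx' : g * x' = xr := Int.mul_ediv_cancel' hgx
    have hcop : Int.gcd x' m = 1 := by
      have := Int.gcd_div_gcd_div_gcd (i := xr) (j := b) (by rw [hg1] at hgpos; exact_mod_cast hgpos)
      rw [hx'', hm', hg1]
      exact_mod_cast this
    have ht : y0 = inv * q - m * ((inv * q) / m) := by
      rw [hy0', Int.emod_def]
    set t := (inv * q) / m with ht'
    -- y0 is a solution: b ∣ xr*y0 - nb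
    have hby0 : b ∣ xr * y0 - nb := by
      have d1 : b ∣ xr * y0 - xr * (inv * q) := ⟨-(x' * t), by linear_combination xr * ht + m * t * hx' - x' * t * hm⟩
      have d2 : b ∣ xr * (inv * q) - nb := ⟨-(w * q), by linear_combination q * hbez + hq⟩
      have := dvd_add d1 d2
      simpa using this
    -- membership characterization
    have hchar : ∀ y : Int, (0 ≤ y ∧ y < b ∧ PySem.Int.mod (xr * y) b = nb) ↔
        (∃ k, 0 ≤ k ∧ k < g ∧ y = y0 + k * m) := by
      intro y
      constructor
      · rintro ⟨hy0le, hyb, hmod⟩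
        have hmody : (xr * y) % b = nb := by
          rw [← PySem.Int.mod_eq_emod_of_pos hb]; exact hmod
        have hdy : b ∣ xr * y - nb := by
          have := Int.emod_def (xr * y) b
          exact ⟨(xr * y) / b, by linear_combination hmody - this⟩
        have hdiff : b ∣ xr * (y - y0) := by
          have := dvd_sub hdy hby0
          have h2 : xr * y - nb - (xr * y0 - nb) = xr * (y - y0) := by ring
          rwa [h2] at this
        obtain ⟨c, hc⟩ := hdiff
        have hxc : x' * (y - y0) = m * c := by
          apply mul_left_cancel₀ (ne_of_gt hgpos)
          linear_combination hc + (y - y0) * hx' - c * hm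
        have hmdvd : m ∣ (y - y0) := by
          have hmd : m ∣ x' * (y - y0) := ⟨c, hxc⟩
          have hco : IsCoprime x' (m : Int) := Int.isCoprime_iff_gcd_eq_one.mpr hcop
          exact IsCoprime.dvd_of_dvd_mul_left hco.symm hmd
        obtain ⟨k, hk⟩ := hmdvd
        refine ⟨k, ?_, ?_, by linarith [hk]⟩
        · by_contra hneg
          push Not at hneg
          have : k ≤ -1 := by omega
          have : m * k ≤ m * (-1) := by
            exact mul_le_mul_of_nonneg_left this (le_of_lt hmpos)
          omega
        · by_contra hge
          push Not at hge
          have : m * g ≤ m * k := mul_le_mul_of_nonneg_left hge (le_of_lt hmpos)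
          omega
      · rintro ⟨k, hk0, hkg, rfl⟩
        have hkm : k * m ≤ (g - 1) * m :=
          mul_le_mul_of_nonneg_right (by omega) (le_of_lt hmpos)
        refine ⟨by positivity, by nlinarith, ?_⟩
        have hdy : b ∣ xr * (y0 + k * m) - nb := by
          have d3 : b ∣ xr * (k * m) := ⟨k * x', by linear_combination k * x' * hm - k * m * hx'⟩
          have := dvd_add hby0 d3
          have h2 : xr * y0 - nb + xr * (k * m) = xr * (y0 + k * m) - nb := by ring
          rwa [h2] at this
        rw [PySem.Int.mod_eq_emod_of_pos hb]
        obtain ⟨c, hc⟩ := hdy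
        have : xr * (y0 + k * m) = nb + b * c := by linarith
        rw [this, Int.add_mul_emod_self_left]
        exact Int.emod_eq_of_lt hnb0 hnbb
    -- list equality via strict sortedness + permutation
    have hLp : List.Pairwise (· < ·)
        (List.filter (fun yr => PySem.Int.mod (xr * yr) b == nb) (PySem.List.pyRange 0 b 1)) :=
      List.Pairwise.sublist List.filter_sublist (PySem.List.pairwise_lt_pyRange_one 0 b)
    have hRp : List.Pairwise (· < ·)
        (List.map (fun k => y0 + k * m) (PySem.List.pyRange 0 g 1)) := by
      refine List.Pairwise.map _ ?_ (PySem.List.pairwise_lt_pyRange_one 0 g)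
      intro a a' haa
      have := mul_lt_mul_of_pos_right haa hmpos
      linarith
    have hLn : (List.filter (fun yr => PySem.Int.mod (xr * yr) b == nb)
        (PySem.List.pyRange 0 b 1)).Nodup := List.Pairwise.imp ne_of_lt hLp
    have hRn : (List.map (fun k => y0 + k * m) (PySem.List.pyRange 0 g 1)).Nodup :=
      List.Pairwise.imp ne_of_lt hRp
    have hmem : ∀ y : Int,
        y ∈ List.filter (fun yr => PySem.Int.mod (xr * yr) b == nb) (PySem.List.pyRange 0 b 1) ↔
        y ∈ List.map (fun k => y0 + k * m) (PySem.List.pyRange 0 g 1) := by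
      intro y
      rw [List.mem_filter, List.mem_map]
      constructor
      · rintro ⟨hyr, hcond⟩
        obtain ⟨hy1, hy2⟩ := PySem.List.mem_pyRange_one.mp hyr
        obtain ⟨k, hk1, hk2, hk3⟩ := (hchar y).mp ⟨hy1, hy2, by rwa [beq_iff_eq] at hcond⟩
        exact ⟨k, PySem.List.mem_pyRange_one.mpr ⟨hk1, hk2⟩, hk3.symm⟩
      · rintro ⟨k, hk, rfl⟩
        obtain ⟨hk1, hk2⟩ := PySem.List.mem_pyRange_one.mp hk
        obtain ⟨h1, h2, h3⟩ := (hchar (y0 + k * m)).mpr ⟨k, hk1, hk2, rfl⟩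
        exact ⟨PySem.List.mem_pyRange_one.mpr ⟨h1, h2⟩, by rwa [beq_iff_eq]⟩
    have hperm : (List.map (fun k => y0 + k * m) (PySem.List.pyRange 0 g 1)).Perm
        (List.filter (fun yr => PySem.Int.mod (xr * yr) b == nb) (PySem.List.pyRange 0 b 1)) :=
      (List.perm_ext_iff_of_nodup hRn hLn).mpr (fun y => (hmem y).symm)
    have e1 := PySem.List.sorted_eq_of_perm_of_pairwise_lt
      (List.filter (fun yr => PySem.Int.mod (xr * yr) b == nb) (PySem.List.pyRange 0 b 1))
      (List.filter (fun yr => PySem.Int.mod (xr * yr) b == nb) (PySem.List.pyRange 0 b 1))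
      (fun y => y) (List.Perm.refl _) hLp
    have e2 := PySem.List.sorted_eq_of_perm_of_pairwise_lt
      (List.filter (fun yr => PySem.Int.mod (xr * yr) b == nb) (PySem.List.pyRange 0 b 1))
      (List.map (fun k => y0 + k * m) (PySem.List.pyRange 0 g 1))
      (fun y => y) hperm hRp
    exact e1.symm.trans e2
  · -- unsolvable case
    rw [if_neg (by rw [beq_iff_eq]; exact fun h => hdvd ((PySem.Int.mod_eq_zero_iff_dvd nb g).mp h))]
    rw [List.filter_eq_nil_iff]
    intro y hy
    rw [beq_iff_eq]
    intro hmod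
    apply hdvd
    have hmody : (xr * y) % b = nb := by rw [← PySem.Int.mod_eq_emod_of_pos hb]; exact hmod
    have hdy : b ∣ xr * y - nb := by
      have := Int.emod_def (xr * y) b
      exact ⟨(xr * y) / b, by linear_combination hmody - this⟩
    have h1 : g ∣ xr * y - nb := dvd_trans hgb hdy
    have h2 : g ∣ xr * y := Dvd.dvd.mul_right hgx y
    have := dvd_sub h2 h1
    simpa using this
theorem pvPairs_eq (n b : Int) (hb : b ≠ 0) :
    (PySem.List.pyRange 0 b 1).foldl (fun ps xr =>
      (PySem.List.pyRange 0 b 1).foldl (fun ps yr =>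
        if PySem.Int.mod (xr * yr) b == PySem.Int.mod n b then PySem.Set.add ps (xr, yr) else ps) ps)
      PySem.Set.empty
    = (PySem.List.pyRange 0 b 1).foldl (fun ps xr =>
        let e := pvEgcd xr b
        if PySem.Int.mod (PySem.Int.mod n b) e.1 == 0 then
          let m := PySem.Int.floordiv b e.1
          let y0 := PySem.Int.mod (e.2.1 * PySem.Int.floordiv (PySem.Int.mod n b) e.1) m
          (PySem.List.pyRange 0 e.1 1).foldl (fun ps k => PySem.Set.add ps (xr, y0 + k * m)) ps
        else ps) PySem.Set.empty := by
  rcases lt_or_gt_of_ne hb with hneg | hpos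
  · have hnil : PySem.List.pyRange 0 b 1 = [] := by
      rw [List.eq_nil_iff_forall_not_mem]
      intro x hx
      have := PySem.List.mem_pyRange_one.mp hx
      omega
    rw [hnil]
    rfl
  · have hnb0 : 0 ≤ PySem.Int.mod n b := PySem.Int.mod_nonneg n hpos
    have hnbb : PySem.Int.mod n b < b := PySem.Int.mod_lt n hpos
    -- rewrite A's loop body into fold-of-add over a mapped filter
    have stepA : (fun (ps : PySem.Set (Int × Int)) (xr : Int) =>
        (PySem.List.pyRange 0 b 1).foldl (fun ps yr =>
          if PySem.Int.mod (xr * yr) b == PySem.Int.mod n b then PySem.Set.add ps (xr, yr) else ps) ps)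
        = (fun ps xr =>
          (((PySem.List.pyRange 0 b 1).filter
              (fun yr => PySem.Int.mod (xr * yr) b == PySem.Int.mod n b)).map
            (fun y => (xr, y))).foldl PySem.Set.add ps) := by
      funext ps xr
      rw [PySem.List.foldl_if_eq_foldl_filter
            (p := fun yr => PySem.Int.mod (xr * yr) b == PySem.Int.mod n b)
            (f := fun ps yr => PySem.Set.add ps (xr, yr))]
      rw [List.foldl_map]
    -- rewrite B's loop body likewise
    have stepB : (fun (ps : PySem.Set (Int × Int)) (xr : Int) =>
        let e := pvEgcd xr b
        if PySem.Int.mod (PySem.Int.mod n b) e.1 == 0 then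
          let m := PySem.Int.floordiv b e.1
          let y0 := PySem.Int.mod (e.2.1 * PySem.Int.floordiv (PySem.Int.mod n b) e.1) m
          (PySem.List.pyRange 0 e.1 1).foldl (fun ps k => PySem.Set.add ps (xr, y0 + k * m)) ps
        else ps)
        = (fun ps xr =>
          (((if PySem.Int.mod (PySem.Int.mod n b) (pvEgcd xr b).1 == 0 then
              (PySem.List.pyRange 0 (pvEgcd xr b).1 1).map
                (fun k => PySem.Int.mod ((pvEgcd xr b).2.1 * PySem.Int.floordiv (PySem.Int.mod n b) (pvEgcd xr b).1)
                            (PySem.Int.floordiv b (pvEgcd xr b).1)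
                          + k * PySem.Int.floordiv b (pvEgcd xr b).1)
            else [])).map (fun y => (xr, y))).foldl PySem.Set.add ps) := by
      funext ps xr
      by_cases hc : PySem.Int.mod (PySem.Int.mod n b) (pvEgcd xr b).1 == 0
      · simp only [hc, if_true, List.map_map]
        rw [List.foldl_map]
        rfl
      · simp only [hc, Bool.false_eq_true, if_false]
        rfl
    rw [stepA, stepB]
    rw [pvFoldlBuild _ (PySem.List.pyRange 0 b 1) PySem.Set.empty (by intro p hp; cases hp)
          (PySem.List.nodup_pyRange_one 0 b)
          (fun x _ => List.Nodup.filter _ (PySem.List.nodup_pyRange_one 0 b))]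
    rw [pvFoldlBuild _ (PySem.List.pyRange 0 b 1) PySem.Set.empty (by intro p hp; cases hp)
          (PySem.List.nodup_pyRange_one 0 b) ?nd]
    case nd =>
      intro x hx
      split
      · rename_i hc
        have hx0 : 0 ≤ x := (PySem.List.mem_pyRange_one.mp hx).1
        obtain ⟨hg1, _⟩ := pvEgcd_spec x b hx0 (le_of_lt hpos)
        have hgpos : (0 : Int) < (pvEgcd x b).1 := by
          rw [hg1]
          exact_mod_cast Int.gcd_pos_of_ne_zero_right x hb
        have hmpos : 0 < PySem.Int.floordiv b (pvEgcd x b).1 := by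
          rw [PySem.Int.floordiv_eq_ediv_of_pos hgpos]
          have hgb : (pvEgcd x b).1 ∣ b := hg1 ▸ Int.gcd_dvd_right x b
          have := Int.ediv_mul_cancel hgb
          nlinarith [this]
        refine List.Nodup.map ?_ (PySem.List.nodup_pyRange_one 0 _)
        intro k k' hkk
        dsimp at hkk
        have h2 : k * PySem.Int.floordiv b (pvEgcd x b).1 = k' * PySem.Int.floordiv b (pvEgcd x b).1 := by
          linarith [hkk]
        exact mul_right_cancel₀ (ne_of_gt hmpos) h2
      · exact List.nodup_nil
    refine congrArg (PySem.Set.empty ++ ·) ?_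
    apply List.flatMap_congr
    intro xr hxr
    have hx0 : 0 ≤ xr := (PySem.List.mem_pyRange_one.mp hxr).1
    rw [pvSol_eq b (PySem.Int.mod n b) xr hpos hx0 hnb0 hnbb]

-- ===== VERDICT (by name: the statement is the Claim_ definition above) =====
theorem base_hop_prefilter_spec : Claim_equal_base_hop_prefilter := by
  intro n bases _ hpre
  unfold Spec_base_hop_prefilter base_hop_prefilter base_hop_prefilter_alt
  unfold Pre_base_hop_prefilter at hpre
  cases bases with
  | none =>
    refine congrArg PySem.Dict.items ?_
    apply PySem.List.foldl_congr_mem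
    intro d b hb
    refine congrArg (d.insert b) (pvPairs_eq n b ?_)
    rintro rfl
    simp at hb
  | some l =>
    simp only [Option.getD] at hpre
    refine congrArg PySem.Dict.items ?_
    apply PySem.List.foldl_congr_mem
    intro d b hb
    refine congrArg (d.insert b) (pvPairs_eq n b ?_)
    rintro rfl
    exact hpre hb
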